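-- pv_equiv track=rewrite | github.com/WallyAsh/team13-empirisk-forskning | scrape/news_processor.py | merge_articles
-- ===== SOURCE A (Python) =====
-- def merge_articles(existing_articles, new_articles):
--     """
--     Merge new articles with existing ones, avoiding duplicates.
--     Uses article link as the unique identifier.
--     """
--     # Create a dict of existing articles for faster lookup
--     existing_links = {article['link']: article for article in existing_articles}
--
--     # Only add articles that don't already exist
--     unique_new_articles = []
--     for article in new_articles:
--         if article['link'] not in existing_links:
--             unique_new_articles.append(article)
--             existing_links[article['link']] = article
--
--     # Return the merged list of articles
--     return existing_articles + unique_new_articles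
-- ===== SOURCE B (Python) =====
-- def merge_articles(existing_articles, new_articles):
--     """
--     Merge new articles with existing ones, avoiding duplicates.
--     Uses article link as the unique identifier.
--     """
--     existing_links = [article['link'] for article in existing_articles]
--
--     def dedup(articles):
--         # keep the first occurrence of each link by filtering it out of the tail
--         if not articles:
--             return []
--         head, tail = articles[0], articles[1:]
--         return [head] + dedup([a for a in tail if a['link'] != head['link']])
--
--     return existing_articles + [a for a in dedup(new_articles)
--                                 if a['link'] not in existing_links]
-- ===== Notes on version B (the rewrite author's own statement) =====
-- stated objective: alternative
-- what changed: Replaces A's stateful scan with a growing seen-dict by a recursive nub that removes each head's duplicates by filtering the tail (no seen structure at all), followed by one filter against the existing links.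
import Mathlib
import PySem

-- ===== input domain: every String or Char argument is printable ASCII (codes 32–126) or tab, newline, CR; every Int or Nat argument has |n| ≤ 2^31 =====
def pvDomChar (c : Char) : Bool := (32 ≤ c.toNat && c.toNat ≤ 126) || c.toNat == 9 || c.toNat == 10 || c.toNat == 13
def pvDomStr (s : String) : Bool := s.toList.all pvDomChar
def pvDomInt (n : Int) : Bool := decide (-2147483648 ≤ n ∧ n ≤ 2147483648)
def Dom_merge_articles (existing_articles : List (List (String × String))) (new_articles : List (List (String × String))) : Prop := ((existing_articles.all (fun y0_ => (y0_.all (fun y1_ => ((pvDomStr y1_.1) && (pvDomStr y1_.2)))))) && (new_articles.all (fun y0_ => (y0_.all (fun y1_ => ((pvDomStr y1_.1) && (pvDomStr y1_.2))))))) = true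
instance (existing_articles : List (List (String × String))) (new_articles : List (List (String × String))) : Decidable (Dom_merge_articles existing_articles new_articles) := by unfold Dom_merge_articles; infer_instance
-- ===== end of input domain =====

-- B replaces A's stateful seen-dict scan by a recursive nub that deletes each head's
-- duplicates from the tail, then one filter against the existing links (objective: alternative).

-- article['link'] on an association-list dict: first matching pair (none = KeyError, excluded by Pre_)
def pvLink (a : List (String × String)) : Option String :=
  (a.find? (fun p => p.1 == "link")).map (·.2)

-- total form of article['link'], used by both ports under Pre_ (which guarantees the key exists)
def pvLinkD (a : List (String × String)) : String := (pvLink a).getD ""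

-- ===== PORT A =====
def merge_articles (existing_articles : List (List (String × String))) (new_articles : List (List (String × String))) : List (List (String × String)) :=
  let existing_links : PySem.Dict String (List (String × String)) :=
    existing_articles.foldl (fun d a => d.insert (pvLinkD a) a) PySem.Dict.empty
  let st :=
    new_articles.foldl
      (fun (st : List (List (String × String)) × PySem.Dict String (List (String × String))) a =>
        if st.2.contains (pvLinkD a) then st
        else (st.1 ++ [a], st.2.insert (pvLinkD a) a))
      ([], existing_links)
  existing_articles ++ st.1

-- ===== PORT B =====
-- Source B's inner recursive 'dedup': keep the head, delete its duplicates from the tail, recurse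
def pvDedup : List (List (String × String)) → List (List (String × String))
  | [] => []
  | a :: l => a :: pvDedup (l.filter (fun x => pvLinkD x != pvLinkD a))
termination_by l => l.length
decreasing_by
  simpa using Nat.lt_succ_of_le (List.length_filter_le _ _)

def merge_articles_alt (existing_articles : List (List (String × String))) (new_articles : List (List (String × String))) : List (List (String × String)) :=
  let existing_links : List String := existing_articles.map pvLinkD
  existing_articles ++
    ((pvDedup new_articles).filter (fun a => !(existing_links.contains (pvLinkD a))))

-- ===== PRECONDITION & SPEC =====
-- Pre_ excludes exactly the inputs where Python A raises KeyError: an article without a 'link' key.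
def Pre_merge_articles (existing_articles : List (List (String × String))) (new_articles : List (List (String × String))) : Prop :=
  (∀ a ∈ existing_articles, (pvLink a).isSome) ∧ (∀ a ∈ new_articles, (pvLink a).isSome)
instance (existing_articles : List (List (String × String))) (new_articles : List (List (String × String))) : Decidable (Pre_merge_articles existing_articles new_articles) := by unfold Pre_merge_articles; infer_instance
def pvWitness_merge_articles : (List (List (String × String))) × (List (List (String × String))) :=
  ([[("link", "http://a"), ("title", "A")]], [[("link", "http://b"), ("title", "B")], [("link", "http://a"), ("title", "A2")]])

def Spec_merge_articles (existing_articles : List (List (String × String))) (new_articles : List (List (String × String))) (out : List (List (String × String))) : Prop := out = merge_articles_alt existing_articles new_articles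
instance (existing_articles : List (List (String × String))) (new_articles : List (List (String × String))) (out : List (List (String × String))) : Decidable (Spec_merge_articles existing_articles new_articles out) := by unfold Spec_merge_articles; infer_instance

-- ===== CLAIM (what is proved, stated in full; the proofs are below) =====
def Claim_equal_merge_articles : Prop := ∀ (existing_articles : List (List (String × String))) (new_articles : List (List (String × String))), Dom_merge_articles existing_articles new_articles → Pre_merge_articles existing_articles new_articles → Spec_merge_articles existing_articles new_articles (merge_articles existing_articles new_articles)

-- ===== LEMMAS AND PROOFS =====

-- recursive characterisation of A's scan: the articles A appends, given the current lookup dict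
def pvRefA (d : PySem.Dict String (List (String × String))) : List (List (String × String)) → List (List (String × String))
  | [] => []
  | a :: l =>
    if d.contains (pvLinkD a) then pvRefA d l
    else a :: pvRefA (d.insert (pvLinkD a) a) l

-- seen-list characterisation shared by both sides
def pvKeep (seen : List String) : List (List (String × String)) → List (List (String × String))
  | [] => []
  | a :: l =>
    if seen.contains (pvLinkD a) then pvKeep seen l
    else a :: pvKeep (pvLinkD a :: seen) l

lemma pv_foldA_eq (l : List (List (String × String))) :
    ∀ (acc : List (List (String × String))) (d : PySem.Dict String (List (String × String))),
      (l.foldl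
        (fun (st : List (List (String × String)) × PySem.Dict String (List (String × String))) a =>
          if st.2.contains (pvLinkD a) then st
          else (st.1 ++ [a], st.2.insert (pvLinkD a) a)) (acc, d)).1
      = acc ++ pvRefA d l := by
  induction l with
  | nil => intro acc d; simp [pvRefA]
  | cons a l ih =>
    intro acc d
    by_cases h : d.contains (pvLinkD a)
    · simp [pvRefA, h, ih]
    · simp [pvRefA, h, ih]

lemma pv_refA_eq_keep (l : List (List (String × String))) :
    ∀ (d : PySem.Dict String (List (String × String))) (seen : List String),
      (∀ k, d.contains k = seen.contains k) →
      pvRefA d l = pvKeep seen l := by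
  induction l with
  | nil => intro d seen _; simp [pvRefA, pvKeep]
  | cons a l ih =>
    intro d seen hinv
    have hk := hinv (pvLinkD a)
    by_cases h : pvLinkD a ∈ seen
    · have hd : d.contains (pvLinkD a) = true := by rw [hk]; simp [h]
      simp [pvRefA, pvKeep, hd, h, ih _ _ hinv]
    · have hd : d.contains (pvLinkD a) = false := by rw [hk]; simp [h]
      have hinv' : ∀ k, (d.insert (pvLinkD a) a).contains k
          = (pvLinkD a :: seen).contains k := by
        intro k
        rw [PySem.Dict.contains_insert, hinv k]
        by_cases hke : k = pvLinkD a <;> simp [hke]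
      simp [pvRefA, pvKeep, hd, h, ih _ _ hinv']

-- pvKeep only looks at membership of the seen list
lemma pv_keep_congr (l : List (List (String × String))) :
    ∀ (s t : List String), (∀ k, k ∈ s ↔ k ∈ t) → pvKeep s l = pvKeep t l := by
  induction l with
  | nil => intro s t _; simp [pvKeep]
  | cons a l ih =>
    intro s t hst
    by_cases h : pvLinkD a ∈ s
    · simp [pvKeep, h, (hst _).mp h, ih _ _ hst]
    · have ht : pvLinkD a ∉ t := fun hm => h ((hst _).mpr hm)
      have hst' : ∀ k, k ∈ pvLinkD a :: s ↔ k ∈ pvLinkD a :: t := by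
        intro k; simp [hst k]
      simp [pvKeep, h, ht, ih _ _ hst']

-- marking a link seen = deleting it from the input
lemma pv_keep_cons_filter (k : String) (l : List (List (String × String))) :
    ∀ (seen : List String),
      pvKeep (k :: seen) l = pvKeep seen (l.filter (fun x => pvLinkD x != k)) := by
  induction l with
  | nil => intro seen; simp [pvKeep]
  | cons a l ih =>
    intro seen
    by_cases hak : pvLinkD a = k
    · rw [List.filter_cons_of_neg (by simp [hak])]
      rw [pvKeep, if_pos (by simp [hak]), ih]
    · rw [List.filter_cons_of_pos (by simp [hak])]
      by_cases h : pvLinkD a ∈ seen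
      · rw [pvKeep, if_pos (by simp [h]), pvKeep, if_pos (by simp [h]), ih]
      · have hmem : pvLinkD a ∉ k :: seen := by simp [hak, h]
        rw [pvKeep, if_neg (by simpa using hmem), pvKeep, if_neg (by simpa using h)]
        rw [pv_keep_congr l (pvLinkD a :: k :: seen) (k :: pvLinkD a :: seen)
          (by intro j; constructor <;> (intro hj; simp at hj ⊢; tauto)), ih]
      
-- deleting an already-seen link changes nothing
lemma pv_keep_filter_mem (k : String) (l : List (List (String × String))) :
    ∀ (seen : List String), k ∈ seen →
      pvKeep seen (l.filter (fun x => pvLinkD x != k)) = pvKeep seen l := by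
  induction l with
  | nil => intro seen _; simp
  | cons a l ih =>
    intro seen hks
    by_cases hak : pvLinkD a = k
    · rw [List.filter_cons_of_neg (by simp [hak])]
      rw [ih _ hks, pvKeep, if_pos (by simp [hak, hks])]
    · rw [List.filter_cons_of_pos (by simp [hak])]
      by_cases h : pvLinkD a ∈ seen
      · rw [pvKeep, if_pos (by simp [h]), pvKeep, if_pos (by simp [h]), ih _ hks]
      · rw [pvKeep, if_neg (by simpa using h), pvKeep, if_neg (by simpa using h)]
        rw [ih _ (by simp [hks])]

-- pvKeep is the filtered recursive nub
lemma pv_keep_eq_dedup_filter :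
    ∀ (n : ℕ) (l : List (List (String × String))), l.length ≤ n → ∀ (seen : List String),
      pvKeep seen l = (pvDedup l).filter (fun a => !(seen.contains (pvLinkD a))) := by
  intro n
  induction n with
  | zero =>
    intro l hl seen
    obtain rfl : l = [] := List.length_eq_zero_iff.mp (Nat.le_zero.mp hl)
    simp [pvKeep, pvDedup]
  | succ n ih =>
    intro l hl seen
    match l with
    | [] => simp [pvKeep, pvDedup]
    | a :: l =>
      have hl' : l.length ≤ n := by simpa using hl
      have hlf : (l.filter (fun x => pvLinkD x != pvLinkD a)).length ≤ n :=
        le_trans (List.length_filter_le _ _) hl'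
      rw [pvDedup]
      by_cases h : pvLinkD a ∈ seen
      · rw [pvKeep, if_pos (by simp [h]), List.filter_cons_of_neg (by simp [h])]
        rw [← ih _ hlf seen, pv_keep_filter_mem _ _ _ h]
      · rw [pvKeep, if_neg (by simpa using h), List.filter_cons_of_pos (by simp [h])]
        rw [← ih _ hlf seen, ← pv_keep_cons_filter]

lemma pv_initial_inv (e : List (List (String × String))) :
    ∀ k, (e.foldl (fun d a => d.insert (pvLinkD a) a) PySem.Dict.empty).contains k
      = (e.map pvLinkD).contains k := by
  intro k
  rw [PySem.Dict.contains_eq_decide_mem_keys, PySem.Dict.keys_foldl_insert_key]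
  simp [PySem.Set.update_nil_left, PySem.Set.mem_ofList]

-- ===== VERDICT (by name: the statement is the Claim_ definition above) =====
theorem merge_articles_spec : Claim_equal_merge_articles := by
  intro e n _ _
  unfold Spec_merge_articles merge_articles merge_articles_alt
  simp only []
  rw [pv_foldA_eq]
  rw [pv_refA_eq_keep _ _ _ (pv_initial_inv e)]
  rw [pv_keep_eq_dedup_filter n.length n le_rfl]
  simp
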